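-- pv_equiv track=rewrite | github.com/invoice-group/Invoice | chinese_ocr/tool.py | is_check_dnum
-- ===== SOURCE A (Python) =====
-- def is_check_dnum(msg):
--     msg = msg.replace(' ', '')
--     cnt = 0
--
--     for c in msg:
--         if c >= '0' and c <= '9':
--             cnt += 1
--         else:
--             cnt = 0
--     return cnt == 10 or cnt == 12
-- ===== SOURCE B (Python) =====
-- def is_check_dnum(msg):
--     msg = msg.replace(' ', '')
--     cnt = len(msg) - len(msg.rstrip('0123456789'))
--     return cnt == 10 or cnt == 12
-- ===== Notes on version B (the rewrite author's own statement) =====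
-- stated objective: simpler
-- what changed: Replaces the explicit per-character loop with its resetting counter by a single rstrip-based length difference that yields the trailing digit-run length directly.
import Mathlib
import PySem

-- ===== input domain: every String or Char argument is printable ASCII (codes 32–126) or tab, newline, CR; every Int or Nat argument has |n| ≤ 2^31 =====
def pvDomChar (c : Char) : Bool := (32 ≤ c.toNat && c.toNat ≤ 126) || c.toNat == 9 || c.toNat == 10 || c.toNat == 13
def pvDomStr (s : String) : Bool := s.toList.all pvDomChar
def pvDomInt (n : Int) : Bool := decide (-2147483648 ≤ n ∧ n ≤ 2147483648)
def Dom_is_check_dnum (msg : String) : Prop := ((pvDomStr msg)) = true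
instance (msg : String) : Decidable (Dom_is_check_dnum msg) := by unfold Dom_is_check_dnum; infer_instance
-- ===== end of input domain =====

-- B replaces A's per-character loop with a resetting counter by an rstrip-based length
-- difference that yields the trailing digit-run length directly (objective: simpler).

-- ===== PORT A =====
def is_check_dnum (msg : String) : Bool :=
  let m := PySem.Str.replace msg " " ""
  let cnt := m.toList.foldl (fun cnt c => if '0' ≤ c ∧ c ≤ '9' then cnt + 1 else 0) 0
  cnt == 10 || cnt == 12

-- ===== PORT B =====
-- rstrip('0123456789') is ported by hand (PySem has no char-set rstrip): drop trailing
-- characters belonging to the set — exact for Python's str.rstrip(chars).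
def is_check_dnum_alt (msg : String) : Bool :=
  let s := (PySem.Str.replace msg " " "").toList
  let stripped := (s.reverse.dropWhile (fun c => "0123456789".toList.contains c)).reverse
  let cnt := s.length - stripped.length
  cnt == 10 || cnt == 12

-- ===== PRECONDITION & SPEC =====
def Spec_is_check_dnum (msg : String) (out : Bool) : Prop := out = is_check_dnum_alt msg
instance (msg : String) (out : Bool) : Decidable (Spec_is_check_dnum msg out) := by unfold Spec_is_check_dnum; infer_instance

-- ===== CLAIM (what is proved, stated in full; the proofs are below) =====
def Claim_equal_is_check_dnum : Prop := ∀ (msg : String), Dom_is_check_dnum msg → Spec_is_check_dnum msg (is_check_dnum msg)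

-- ===== LEMMAS AND PROOFS =====

-- membership in the digit-set literal coincides with A's range test
theorem pv_digit_mem (c : Char) :
    ("0123456789".toList.contains c) = decide ('0' ≤ c ∧ c ≤ '9') := by
  have h : ("0123456789".toList.contains c = true) ↔ ('0' ≤ c ∧ c ≤ '9') := by
    simp only [show "0123456789".toList = ['0','1','2','3','4','5','6','7','8','9'] from rfl,
      List.contains_eq_mem, List.mem_cons, List.not_mem_nil, or_false, decide_eq_true_eq,
      Char.le_def, Char.ext_iff, UInt32.le_iff_toNat_le, ← UInt32.toNat_inj]
    norm_num
    simp only [show ('0':Char).toNat = 48 from rfl, show ('1':Char).toNat = 49 from rfl,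
      show ('2':Char).toNat = 50 from rfl, show ('3':Char).toNat = 51 from rfl,
      show ('4':Char).toNat = 52 from rfl, show ('5':Char).toNat = 53 from rfl,
      show ('6':Char).toNat = 54 from rfl, show ('7':Char).toNat = 55 from rfl,
      show ('8':Char).toNat = 56 from rfl, show ('9':Char).toNat = 57 from rfl]
    omega
  rcases Bool.eq_false_or_eq_true ("0123456789".toList.contains c) with h' | h' <;> simp_all

-- A's resetting counter computes the length of the trailing run satisfying p
theorem pv_foldl_takeWhile (p : Char → Prop) [DecidablePred p] (l : List Char) :
    l.foldl (fun cnt c => if p c then cnt + 1 else 0) 0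
      = (l.reverse.takeWhile (fun c => decide (p c))).length := by
  induction l using List.reverseRecOn with
  | nil => simp
  | append_singleton l a ih =>
      rw [List.foldl_append, List.foldl_cons, List.foldl_nil, List.reverse_append]
      simp only [List.reverse_singleton, List.singleton_append, List.takeWhile_cons]
      by_cases h : p a
      · simp [h, ih]
      · simp [h]

-- the two counters agree
theorem pv_cnt (s : List Char) :
    s.foldl (fun cnt c => if '0' ≤ c ∧ c ≤ '9' then cnt + 1 else 0) 0
      = s.length - ((s.reverse.dropWhile (fun c => "0123456789".toList.contains c)).reverse).length := by
  have hpred : (fun c => "0123456789".toList.contains c)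
      = (fun c => decide ('0' ≤ c ∧ c ≤ '9')) := funext pv_digit_mem
  have hsum : ∀ (q : Char → Bool) (r : List Char),
      (r.takeWhile q).length + (r.dropWhile q).length = r.length := by
    intro q r
    rw [← List.length_append, List.takeWhile_append_dropWhile]
  rw [pv_foldl_takeWhile (fun c => '0' ≤ c ∧ c ≤ '9') s, hpred, List.length_reverse]
  have h1 := hsum (fun c => decide ('0' ≤ c ∧ c ≤ '9')) s.reverse
  have h2 : s.reverse.length = s.length := List.length_reverse
  omega

-- ===== VERDICT (by name: the statement is the Claim_ definition above) =====
theorem is_check_dnum_spec : Claim_equal_is_check_dnum := by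
  intro msg _
  unfold Spec_is_check_dnum
  simp only [is_check_dnum, is_check_dnum_alt]
  rw [pv_cnt]
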